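-- pv_equiv track=rewrite | github.com/shaurya30305/Wiring_aware_positioning | src.py | generate_stacked_config_fixed_per_row
-- ===== SOURCE A (Python) =====
-- import math
--
-- def generate_stacked_config_fixed_per_row(gatecoordi):
--     n = len(gatecoordi)
--     gates_per_row = int(math.sqrt(n))
--     config = []
--
--     current_x = 0
--     current_y = 0
--     max_height_in_row = 0
--     gates_in_current_row = 0
--
--     for i, gate in enumerate(gatecoordi):
--         gate_width = gate[0][0]
--         gate_height = gate[0][1]
--
--
--         config.append([current_x, current_y])
--         gates_in_current_row += 1
--         current_x += gate_width + 1
--         max_height_in_row = max(max_height_in_row, gate_height)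
--
--         if gates_in_current_row >= gates_per_row:
--             current_y += max_height_in_row
--             current_x = 0
--             max_height_in_row = 0
--             gates_in_current_row = 0
--
--     return config
-- ===== SOURCE B (Python) =====
-- import math
--
-- def generate_stacked_config_fixed_per_row(gatecoordi):
--     n = len(gatecoordi)
--     per = int(math.sqrt(n))
--     config = []
--     y = 0
--     for start in (range(0, n, per) if per else []):
--         row = gatecoordi[start:start + per]
--         x = 0
--         for g in row:
--             config.append([x, y])
--             x += g[0][0] + 1
--         y += max([g[0][1] for g in row] + [0])
--     return config
-- ===== Notes on version B (the rewrite author's own statement) =====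
-- stated objective: alternative
-- what changed: Replaces A's single stateful loop with reset-on-boundary counters by an explicit row decomposition: gates are grouped into chunks of int(sqrt(n)), each row's x-coordinates are a per-row prefix sum of widths and y advances by each completed row's max height.
import Mathlib
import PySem

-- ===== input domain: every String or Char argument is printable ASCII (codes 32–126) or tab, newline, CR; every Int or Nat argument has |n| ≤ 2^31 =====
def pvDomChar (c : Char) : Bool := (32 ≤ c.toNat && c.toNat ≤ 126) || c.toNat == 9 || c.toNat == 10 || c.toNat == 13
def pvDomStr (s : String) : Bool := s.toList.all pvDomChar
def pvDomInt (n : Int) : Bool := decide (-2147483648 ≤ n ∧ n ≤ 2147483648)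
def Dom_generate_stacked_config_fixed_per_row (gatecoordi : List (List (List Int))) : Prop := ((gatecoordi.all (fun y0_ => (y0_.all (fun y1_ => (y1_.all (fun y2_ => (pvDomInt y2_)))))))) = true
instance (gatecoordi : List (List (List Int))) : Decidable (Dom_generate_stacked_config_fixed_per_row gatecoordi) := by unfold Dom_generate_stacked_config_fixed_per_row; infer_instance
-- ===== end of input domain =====

-- B replaces A's stateful reset-on-boundary loop with an explicit row-grouped prefix-sum
-- computation (chunks of gates_per_row, per-row x prefix sums, running y over row maxima);
-- same O(n) cost, different decomposition.
-- `int(math.sqrt(n))` is ported as `Nat.sqrt n` (exact for every list length in the domain).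

-- gate[0][j] with default 0; Pre_ guarantees the accesses are in range, where this is exact.
def pvGate0 (g : List (List Int)) (j : Int) : Int :=
  (PySem.List.pyGet? ((PySem.List.pyGet? g 0).getD []) j).getD 0

-- ===== PORT A =====
-- state: (config, current_x, current_y, max_height_in_row, gates_in_current_row)
def pvStepA (per : Nat) (s : List (List Int) × Int × Int × Int × Nat) (gate : List (List Int)) :
    List (List Int) × Int × Int × Int × Nat :=
  let w := pvGate0 gate 0
  let h := pvGate0 gate 1
  let config := s.1 ++ [[s.2.1, s.2.2.1]]
  let cnt := s.2.2.2.2 + 1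
  let cx := s.2.1 + w + 1
  let mh := max s.2.2.2.1 h
  if per ≤ cnt then (config, 0, s.2.2.1 + mh, 0, 0)
  else (config, cx, s.2.2.1, mh, cnt)

def generate_stacked_config_fixed_per_row (gatecoordi : List (List (List Int))) : List (List Int) :=
  let per := Nat.sqrt gatecoordi.length
  (gatecoordi.foldl (pvStepA per) ([], 0, 0, 0, 0)).1

-- ===== PORT B =====
-- x-coordinates of one row: prefix sums of gate_width + 1 starting at x
def pvRowConfig (y : Int) (x : Int) : List (List (List Int)) → List (List Int)
  | [] => []
  | g :: gs => [x, y] :: pvRowConfig y (x + pvGate0 g 0 + 1) gs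

-- max([heights] + [0]) folded from m
def pvRowMaxFrom (m : Int) (row : List (List (List Int))) : Int :=
  row.foldl (fun m g => max m (pvGate0 g 1)) m

-- rows of k+1 consecutive gates; y advances by the completed row's max height
def pvBuild (k : Nat) (y : Int) : List (List (List Int)) → List (List Int)
  | [] => []
  | g :: gs =>
      pvRowConfig y 0 (g :: gs.take k) ++
        pvBuild k (y + pvRowMaxFrom 0 (g :: gs.take k)) (gs.drop k)
termination_by l => l.length
decreasing_by simp

def generate_stacked_config_fixed_per_row_alt (gatecoordi : List (List (List Int))) : List (List Int) :=
  match Nat.sqrt gatecoordi.length with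
  | 0 => []
  | k + 1 => pvBuild k 0 gatecoordi

-- ===== PRECONDITION & SPEC =====
-- Pre_ excludes exactly the inputs where Python A raises IndexError (some gate is an empty list or its
-- first element has fewer than 2 entries); A returns on everything Pre_ admits.
def Pre_generate_stacked_config_fixed_per_row (gatecoordi : List (List (List Int))) : Prop :=
  ∀ g ∈ gatecoordi, g ≠ [] ∧ 2 ≤ (g.headD []).length
instance (gatecoordi : List (List (List Int))) : Decidable (Pre_generate_stacked_config_fixed_per_row gatecoordi) := by unfold Pre_generate_stacked_config_fixed_per_row; infer_instance

def pvWitness_generate_stacked_config_fixed_per_row : List (List (List Int)) := [[[2, 3]], [[1, 4]]]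

def Spec_generate_stacked_config_fixed_per_row (gatecoordi : List (List (List Int))) (out : List (List Int)) : Prop := out = generate_stacked_config_fixed_per_row_alt gatecoordi
instance (gatecoordi : List (List (List Int))) (out : List (List Int)) : Decidable (Spec_generate_stacked_config_fixed_per_row gatecoordi out) := by unfold Spec_generate_stacked_config_fixed_per_row; infer_instance

-- ===== CLAIM (what is proved, stated in full; the proofs are below) =====
def Claim_equal_generate_stacked_config_fixed_per_row : Prop := ∀ (gatecoordi : List (List (List Int))), Dom_generate_stacked_config_fixed_per_row gatecoordi → Pre_generate_stacked_config_fixed_per_row gatecoordi → Spec_generate_stacked_config_fixed_per_row gatecoordi (generate_stacked_config_fixed_per_row gatecoordi)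

-- ===== LEMMAS AND PROOFS =====

theorem pvBuild_nil (k : Nat) (y : Int) : pvBuild k y [] = [] := by
  rw [pvBuild.eq_def]

theorem pvBuild_cons (k : Nat) (y : Int) (g : List (List Int)) (gs : List (List (List Int))) :
    pvBuild k y (g :: gs) =
      pvRowConfig y 0 (g :: gs.take k) ++
        pvBuild k (y + pvRowMaxFrom 0 (g :: gs.take k)) (gs.drop k) := by
  rw [pvBuild.eq_def]

-- one non-resetting step of A
theorem pvStepA_lt (per : Nat) (c : Nat) (config : List (List Int)) (x y mh : Int)
    (g : List (List Int)) (h : c + 1 < per) :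
    pvStepA per (config, x, y, mh, c) g =
      (config ++ [[x, y]], x + pvGate0 g 0 + 1, y, max mh (pvGate0 g 1), c + 1) := by
  simp only [pvStepA]
  rw [if_neg (by omega)]

-- the resetting step of A
theorem pvStepA_ge (per : Nat) (c : Nat) (config : List (List Int)) (x y mh : Int)
    (g : List (List Int)) (h : per ≤ c + 1) :
    pvStepA per (config, x, y, mh, c) g =
      (config ++ [[x, y]], 0, y + max mh (pvGate0 g 1), 0, 0) := by
  simp only [pvStepA]
  rw [if_pos (by omega)]

-- a strictly partial row never triggers the reset branch
theorem pvFold_partial (per : Nat) :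
    ∀ (row : List (List (List Int))) (c : Nat) (config : List (List Int)) (x y mh : Int),
      c + row.length < per →
      List.foldl (pvStepA per) (config, x, y, mh, c) row =
        (config ++ pvRowConfig y x row,
         row.foldl (fun x g => x + pvGate0 g 0 + 1) x, y, pvRowMaxFrom mh row,
         c + row.length) := by
  intro row
  induction row with
  | nil => intro c config x y mh _; simp [pvRowConfig, pvRowMaxFrom]
  | cons g gs ih =>
      intro c config x y mh hlt
      simp only [List.length_cons] at hlt
      rw [List.foldl_cons, pvStepA_lt per c config x y mh g (by omega),
          ih (c + 1) _ _ _ _ (by omega)]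
      simp [pvRowConfig, pvRowMaxFrom]
      omega

-- a row that exactly fills up ends with the reset branch
theorem pvFold_full (per : Nat) :
    ∀ (row : List (List (List Int))) (c : Nat) (config : List (List Int)) (x y mh : Int),
      c + row.length = per → row ≠ [] →
      List.foldl (pvStepA per) (config, x, y, mh, c) row =
        (config ++ pvRowConfig y x row, 0, y + pvRowMaxFrom mh row, 0, 0) := by
  intro row
  induction row with
  | nil => intro _ _ _ _ _ _ hne; exact absurd rfl hne
  | cons g gs ih =>
      intro c config x y mh heq _
      cases gs with
      | nil =>
          simp only [List.length_cons, List.length_nil] at heq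
          rw [List.foldl_cons, pvStepA_ge per c config x y mh g (by omega)]
          simp [pvRowConfig, pvRowMaxFrom]
      | cons g2 gs2 =>
          simp only [List.length_cons] at heq
          rw [List.foldl_cons, pvStepA_lt per c config x y mh g (by omega),
              ih (c + 1) _ _ _ _ (by simp; omega) (by simp)]
          simp [pvRowConfig, pvRowMaxFrom]

theorem pvFold_build (n : Nat) :
    ∀ (l : List (List (List Int))) (k : Nat) (config : List (List Int)) (y : Int),
      l.length ≤ n →
      (List.foldl (pvStepA (k + 1)) (config, 0, y, 0, 0) l).1 = config ++ pvBuild k y l := by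
  induction n with
  | zero =>
      intro l k config y hlen
      have hl : l = [] := List.eq_nil_of_length_eq_zero (by omega)
      subst hl; simp [pvBuild_nil]
  | succ n ih =>
      intro l k config y hlen
      cases l with
      | nil => simp [pvBuild_nil]
      | cons g gs =>
          by_cases h : k + 1 ≤ (g :: gs).length
          · -- a full row exists
            have hsplit : g :: gs = (g :: gs.take k) ++ gs.drop k := by
              rw [List.cons_append, List.take_append_drop]
            conv_lhs => rw [hsplit]
            rw [List.foldl_append]
            rw [pvFold_full (k + 1) (g :: gs.take k) 0 config 0 y 0
                  (by simp only [List.length_cons, List.length_take, List.length_cons] at h ⊢; omega)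
                  (by simp)]
            rw [ih (gs.drop k) k _ _ (by simp only [List.length_drop, List.length_cons] at hlen ⊢; omega)]
            rw [pvBuild_cons, List.append_assoc]
          · -- final (strictly partial) row
            simp only [List.length_cons, not_le] at h
            rw [pvFold_partial (k + 1) (g :: gs) 0 config 0 y 0 (by simp; omega)]
            rw [pvBuild_cons]
            have h1 : gs.take k = gs := List.take_of_length_le (by omega)
            have h2 : gs.drop k = [] := List.drop_eq_nil_of_le (by omega)
            simp [h1, h2, pvBuild_nil]

-- ===== VERDICT (by name: the statement is the Claim_ definition above) =====
theorem generate_stacked_config_fixed_per_row_spec : Claim_equal_generate_stacked_config_fixed_per_row := by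
  intro l _ _
  unfold Spec_generate_stacked_config_fixed_per_row
  unfold generate_stacked_config_fixed_per_row generate_stacked_config_fixed_per_row_alt
  cases hs : Nat.sqrt l.length with
  | zero =>
      have h0 : l.length = 0 := Nat.sqrt_eq_zero.mp hs
      have hl : l = [] := List.eq_nil_of_length_eq_zero h0
      subst hl; simp
  | succ k =>
      simpa using pvFold_build l.length l k [] 0 le_rfl
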